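-- pv_equiv track=rewrite | github.com/pr-poehali-dev/bank-heist-score | backend/scores/index.py | calculate_place_points
-- ===== SOURCE A (Python) =====
-- from typing import Dict, Any
--
-- def calculate_place_points(times: list) -> Dict[int, int]:
--     sorted_times = sorted(enumerate(times), key=lambda x: x[1])
--     place_points = {100: [], 75: [], 50: [], 25: []}
--     points_list = [100, 75, 50, 25]
--
--     for idx, (team_idx, _) in enumerate(sorted_times):
--         if idx < len(points_list):
--             place_points[points_list[idx]].append(team_idx)
--
--     result = {}
--     for points, team_indices in place_points.items():
--         for team_idx in team_indices:
--             result[team_idx] = points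
--
--     return result
-- ===== SOURCE B (Python) =====
-- def calculate_place_points(times: list):
--     # Selection scan: no sort. For each tier pick the (time, index)-minimal
--     # remaining team and award it the tier.
--     remaining = list(enumerate(times))
--     result = {}
--     for tier in (100, 75, 50, 25):
--         if not remaining:
--             break
--         best = remaining[0]
--         for cand in remaining[1:]:
--             if (cand[1], cand[0]) < (best[1], best[0]):
--                 best = cand
--         result[best[0]] = tier
--         remaining.remove(best)
--     return result
-- ===== Notes on version B (the rewrite author's own statement) =====
-- stated objective: alternative
-- what changed: Replaces sort-then-assign (stable sort of enumerate(times), route the first four through a tier-keyed dict of lists, then rebuild a result dict) by four selection scans: repeatedly pick the (time, index)-minimal remaining team and award it the next tier directly.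
import Mathlib
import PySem

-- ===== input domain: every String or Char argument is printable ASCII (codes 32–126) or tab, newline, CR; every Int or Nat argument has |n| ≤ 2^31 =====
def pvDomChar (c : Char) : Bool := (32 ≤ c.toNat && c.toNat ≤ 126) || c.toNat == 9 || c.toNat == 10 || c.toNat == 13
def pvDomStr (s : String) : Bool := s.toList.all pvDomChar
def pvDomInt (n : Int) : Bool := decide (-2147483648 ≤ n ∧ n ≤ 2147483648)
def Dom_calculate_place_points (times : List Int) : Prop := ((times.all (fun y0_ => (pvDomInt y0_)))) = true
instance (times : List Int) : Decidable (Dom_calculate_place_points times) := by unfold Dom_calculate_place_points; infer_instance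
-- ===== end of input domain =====

-- B replaces A's sort-then-assign by four selection scans (pick the (time, index)-minimal
-- remaining team per tier); equivalence of the returned association lists is proved below.

-- ===== PORT A =====
-- loop body of A's first for-loop (place_points[points_list[idx]].append(team_idx), guarded by idx < len(points_list))
def pvAstep (points_list : List Int) (d : PySem.Dict Int (List Int)) (p : Int × (Int × Int)) : PySem.Dict Int (List Int) :=
  if p.1 < (points_list.length : Int) then
    match PySem.List.pyGet? points_list p.1 with
    | some key => d.modify key [] (fun l => l ++ [p.2.1])
    | none => d   -- unreachable: 0 ≤ p.1 < len(points_list)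
  else d

-- body of A's second for-loop: for team_idx in team_indices: result[team_idx] = points
def pvAres (r : PySem.Dict Int Int) (q : Int × List Int) : PySem.Dict Int Int :=
  q.2.foldl (fun r ti => r.insert ti q.1) r

def calculate_place_points (times : List Int) : List (Int × Int) :=
  let sorted_times := PySem.List.sorted (PySem.List.enumerate times) (fun x => x.2) false
  let place_points : PySem.Dict Int (List Int) :=
    (((PySem.Dict.empty.insert 100 []).insert 75 []).insert 50 []).insert 25 []
  let points_list : List Int := [100, 75, 50, 25]
  let pp := (PySem.List.enumerate sorted_times).foldl (pvAstep points_list) place_points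
  let result := pp.items.foldl pvAres (PySem.Dict.empty : PySem.Dict Int Int)
  result.items

-- ===== PORT B =====
-- inner scan of Source B: best over remaining[1:] with (time, index) comparison
def pvBestB (b : Int × Int) (rest : List (Int × Int)) : Int × Int :=
  rest.foldl (fun best c => if c.2 < best.2 ∨ (c.2 = best.2 ∧ c.1 < best.1) then c else best) b

-- tier loop of Source B: pick the minimum, record it, remove it from remaining
def pvLoopB : List Int → List (Int × Int) → PySem.Dict Int Int → PySem.Dict Int Int
  | [], _, res => res
  | _ :: _, [], res => res
  | tier :: tiers, r :: rs, res =>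
      let best := pvBestB r rs
      match PySem.List.remove? (r :: rs) best with
      | some rem => pvLoopB tiers rem (res.insert best.1 tier)
      | none => res   -- unreachable: best ∈ remaining

def calculate_place_points_alt (times : List Int) : List (Int × Int) :=
  (pvLoopB [100, 75, 50, 25] (PySem.List.enumerate times) PySem.Dict.empty).items

-- ===== PRECONDITION & SPEC =====
def Spec_calculate_place_points (times : List Int) (out : List (Int × Int)) : Prop := out = calculate_place_points_alt times
instance (times : List Int) (out : List (Int × Int)) : Decidable (Spec_calculate_place_points times out) := by unfold Spec_calculate_place_points; infer_instance

-- ===== CLAIM (what is proved, stated in full; the proofs are below) =====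
def Claim_equal_calculate_place_points : Prop := ∀ (times : List Int), Dom_calculate_place_points times → Spec_calculate_place_points times (calculate_place_points times)

-- ===== LEMMAS AND PROOFS =====

-- the (time, index) lexicographic key both programs order by
def pvKey (x : Int × Int) : Lex (Int × Int) := toLex (x.2, x.1)

lemma pvlt_iff (a b : Int × Int) : (a.2 < b.2 ∨ (a.2 = b.2 ∧ a.1 < b.1)) ↔ pvKey a < pvKey b := by
  simp [pvKey, Prod.Lex.toLex_lt_toLex]

lemma pvKey_lt_of_snd_lt {a b : Int × Int} (h : a.2 < b.2) : pvKey a < pvKey b :=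
  (pvlt_iff a b).mp (Or.inl h)

lemma pvInsertBy_pairwise (x : Int × Int) : ∀ (acc : List (Int × Int)),
    acc.Pairwise (fun a b => pvKey a < pvKey b) →
    (∀ y ∈ acc, y.1 < x.1) →
    (PySem.List.insertBy (fun a b => decide (a.2 < b.2)) x acc).Pairwise (fun a b => pvKey a < pvKey b) := by
  intro acc
  induction acc with
  | nil => intro _ _; simp [PySem.List.insertBy]
  | cons y ys ih =>
    intro hp h2
    rw [List.pairwise_cons] at hp
    obtain ⟨hy, hys⟩ := hp
    by_cases hxy : x.2 < y.2
    · rw [show PySem.List.insertBy (fun a b => decide (a.2 < b.2)) x (y :: ys)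
          = x :: y :: ys by simp [PySem.List.insertBy, hxy]]
      refine List.pairwise_cons.mpr ⟨?_, List.pairwise_cons.mpr ⟨hy, hys⟩⟩
      intro z hz
      rcases List.mem_cons.mp hz with rfl | hz
      · exact pvKey_lt_of_snd_lt hxy
      · exact lt_trans (pvKey_lt_of_snd_lt hxy) (hy z hz)
    · rw [show PySem.List.insertBy (fun a b => decide (a.2 < b.2)) x (y :: ys)
          = y :: PySem.List.insertBy (fun a b => decide (a.2 < b.2)) x ys by
            simp [PySem.List.insertBy, hxy]]
      refine List.pairwise_cons.mpr ⟨?_, ih hys (fun z hz => h2 z (List.mem_cons_of_mem _ hz))⟩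
      intro z hz
      rcases (PySem.List.mem_insertBy _ _ _ _).mp hz with rfl | hz
      · refine (pvlt_iff y z).mp ?_
        rcases lt_or_eq_of_le (le_of_not_gt hxy) with h | h
        · exact Or.inl h
        · exact Or.inr ⟨h, h2 y (List.mem_cons_self)⟩
      · exact hy z hz

lemma pvFold_pairwise : ∀ (e acc : List (Int × Int)),
    acc.Pairwise (fun a b => pvKey a < pvKey b) →
    (∀ y ∈ acc, ∀ x ∈ e, y.1 < x.1) →
    e.Pairwise (fun a b => a.1 < b.1) →
    (e.foldl (fun acc x => PySem.List.insertBy (fun a b => decide (a.2 < b.2)) x acc) acc).Pairwise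
      (fun a b => pvKey a < pvKey b) := by
  intro e
  induction e with
  | nil => intro acc h _ _; exact h
  | cons x xs ih =>
    intro acc hacc hlt he
    rw [List.pairwise_cons] at he
    refine ih _ (pvInsertBy_pairwise x acc hacc (fun y hy => hlt y hy x List.mem_cons_self)) ?_ he.2
    intro y hy z hz
    rcases (PySem.List.mem_insertBy _ _ _ _).mp hy with rfl | hy
    · exact he.1 z hz
    · exact hlt y hy z (List.mem_cons_of_mem _ hz)

lemma pvSorted_pairwise (e : List (Int × Int)) (he : e.Pairwise (fun a b => a.1 < b.1)) :
    (PySem.List.sorted e (fun x => x.2) false).Pairwise (fun a b => pvKey a < pvKey b) := by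
  rw [PySem.List.sorted_eq_foldl_insertBy]
  exact pvFold_pairwise e [] (List.Pairwise.nil) (by simp) he

lemma pvBestB_mem (r : Int × Int) (rs : List (Int × Int)) : pvBestB r rs ∈ r :: rs := by
  induction rs generalizing r with
  | nil => exact List.mem_cons_self
  | cons c cs ih =>
    show (List.foldl _ (if c.2 < r.2 ∨ (c.2 = r.2 ∧ c.1 < r.1) then c else r) cs) ∈ _
    split
    · exact List.mem_cons_of_mem _ (ih c)
    · rcases List.mem_cons.mp (ih r) with h | h
      · exact List.mem_cons.mpr (Or.inl h)
      · exact List.mem_cons_of_mem _ (List.mem_cons_of_mem _ h)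

lemma pvBestB_min (r : Int × Int) (rs : List (Int × Int)) :
    ∀ y ∈ r :: rs, pvKey (pvBestB r rs) ≤ pvKey y := by
  induction rs generalizing r with
  | nil =>
    intro y hy
    rcases List.mem_cons.mp hy with rfl | h
    · exact le_refl _
    · cases h
  | cons c cs ih =>
    have step : pvBestB r (c :: cs) = pvBestB (if c.2 < r.2 ∨ (c.2 = r.2 ∧ c.1 < r.1) then c else r) cs := rfl
    intro y hy
    rw [step]
    rcases List.mem_cons.mp hy with hyr | hy2
    · subst hyr
      by_cases hc : c.2 < y.2 ∨ (c.2 = y.2 ∧ c.1 < y.1)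
      · rw [if_pos hc]
        exact le_trans (ih c c List.mem_cons_self) (le_of_lt ((pvlt_iff c y).mp hc))
      · rw [if_neg hc]
        exact ih y y List.mem_cons_self
    · rcases List.mem_cons.mp hy2 with hyc | hy3
      · rw [← hyc]
        by_cases hc : y.2 < r.2 ∨ (y.2 = r.2 ∧ y.1 < r.1)
        · rw [if_pos hc]
          exact ih y y List.mem_cons_self
        · rw [if_neg hc]
          exact le_trans (ih r r List.mem_cons_self)
            (not_lt.mp (fun h2 => hc ((pvlt_iff y r).mpr h2)))
      · split
        · exact ih c y (List.mem_cons_of_mem _ hy3)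
        · exact ih r y (List.mem_cons_of_mem _ hy3)

lemma pvKey_inj : Function.Injective pvKey := by
  intro a b h
  simp only [pvKey, toLex_inj, Prod.mk.injEq] at h
  exact Prod.ext h.2 h.1

lemma pvSorted_eq (e s : List (Int × Int)) (he : e.Pairwise (fun a b => a.1 < b.1))
    (hperm : s.Perm e) (hs : s.Pairwise (fun a b => pvKey a < pvKey b)) :
    PySem.List.sorted e (fun x => x.2) false = s := by
  apply PySem.List.eq_of_perm_of_pairwise_le_of_injective pvKey pvKey_inj
  · exact (PySem.List.sorted_perm _ _ _).trans hperm.symm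
  · exact (pvSorted_pairwise e he).imp le_of_lt
  · exact hs.imp le_of_lt

lemma pvNodup (e : List (Int × Int)) (he : e.Pairwise (fun a b => a.1 < b.1)) : e.Nodup :=
  he.imp (fun h heq => absurd (heq ▸ h) (lt_irrefl _))

lemma pvSorted_cons (r : Int × Int) (rs : List (Int × Int))
    (he : (r :: rs).Pairwise (fun a b => a.1 < b.1)) :
    PySem.List.sorted (r :: rs) (fun x => x.2) false =
      pvBestB r rs :: PySem.List.sorted ((r :: rs).erase (pvBestB r rs)) (fun x => x.2) false := by
  have hmem := pvBestB_mem r rs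
  have hnd := pvNodup _ he
  have he' : ((r :: rs).erase (pvBestB r rs)).Pairwise (fun a b => a.1 < b.1) :=
    he.sublist List.erase_sublist
  apply pvSorted_eq _ _ he
  · exact (List.Perm.cons _ (PySem.List.sorted_perm _ _ _)).trans
      (List.perm_cons_erase hmem).symm
  · refine List.pairwise_cons.mpr ⟨?_, pvSorted_pairwise _ he'⟩
    intro z hz
    have hz' : z ∈ (r :: rs).erase (pvBestB r rs) := (PySem.List.mem_sorted _ _ _ _).mp hz
    have hzne : z ≠ pvBestB r rs := ((List.Nodup.mem_erase_iff hnd).mp hz').1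
    have hle := pvBestB_min r rs z (List.mem_of_mem_erase hz')
    exact lt_of_le_of_ne hle (fun h => hzne (pvKey_inj h.symm))

lemma pvFstNe (e : List (Int × Int)) (he : e.Pairwise (fun a b => a.1 < b.1))
    {b y : Int × Int} (hb : b ∈ e) (hy : y ∈ e) (hne : y ≠ b) : y.1 ≠ b.1 := by
  have hnd : (e.map (·.1)).Nodup :=
    (List.pairwise_map.mpr he).imp ne_of_lt
  intro h
  exact hne (List.inj_on_of_nodup_map hnd hy hb h)

lemma pvLoopB_eq : ∀ (tiers : List Int) (e : List (Int × Int)) (res : PySem.Dict Int Int),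
    e.Pairwise (fun a b => a.1 < b.1) →
    (∀ y ∈ e, res.contains y.1 = false) →
    (pvLoopB tiers e res).items =
      res.items ++ ((PySem.List.sorted e (fun x => x.2) false).zip tiers).map (fun p => (p.1.1, p.2)) := by
  intro tiers
  induction tiers with
  | nil => intro e res _ _; simp [pvLoopB]
  | cons tier tiers ih =>
    intro e res he hres
    cases e with
    | nil => simp [pvLoopB, PySem.List.sorted]
    | cons r rs =>
      have hmem := pvBestB_mem r rs
      rw [show pvLoopB (tier :: tiers) (r :: rs) res
            = pvLoopB tiers ((r :: rs).erase (pvBestB r rs))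
                (res.insert (pvBestB r rs).1 tier) by
          simp [pvLoopB, PySem.List.remove?_eq_some_erase _ _ hmem]]
      have he' : ((r :: rs).erase (pvBestB r rs)).Pairwise (fun a b => a.1 < b.1) :=
        he.sublist List.erase_sublist
      have hnd := pvNodup _ he
      rw [ih _ _ he' ?_]
      · rw [pvSorted_cons r rs he,
          PySem.Dict.items_insert_of_not_contains _ _ (hres _ hmem)]
        simp
      · intro y hy
        have hyne : y ≠ pvBestB r rs := ((List.Nodup.mem_erase_iff hnd).mp hy).1
        rw [PySem.Dict.contains_insert]
        rw [hres y (List.mem_of_mem_erase hy)]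
        simp [pvFstNe _ he hmem (List.mem_of_mem_erase hy) hyne]

lemma pvAfold_high : ∀ (l : List (Int × Int)) (k : Int) (d : PySem.Dict Int (List Int)), 4 ≤ k →
    (PySem.List.enumerate l k).foldl (pvAstep [100, 75, 50, 25]) d = d := by
  intro l
  induction l with
  | nil => intro k d _; simp [PySem.List.enumerate_nil]
  | cons x xs ih =>
    intro k d hk
    rw [PySem.List.enumerate_cons, List.foldl_cons]
    rw [show pvAstep [100, 75, 50, 25] d (k, x) = d by
      simp only [pvAstep]; rw [if_neg (by simp; omega)]]
    exact ih (k + 1) d (by omega)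

lemma pvIns1 (k1 v1 : Int) :
    (((PySem.Dict.empty : PySem.Dict Int Int).insert k1 v1)).items = [(k1, v1)] := by
  rw [PySem.Dict.items_insert_of_not_contains _ _ (PySem.Dict.contains_empty k1)]
  rfl

lemma pvIns2 (k1 k2 v1 v2 : Int) (h21 : (k2 == k1) = false) :
    ((((PySem.Dict.empty : PySem.Dict Int Int).insert k1 v1).insert k2 v2)).items
      = [(k1, v1), (k2, v2)] := by
  have c2 : (((PySem.Dict.empty : PySem.Dict Int Int).insert k1 v1)).contains k2 = false := by
    rw [PySem.Dict.contains_insert]; simp [h21]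
  rw [PySem.Dict.items_insert_of_not_contains _ _ c2, pvIns1]; rfl

lemma pvIns3 (k1 k2 k3 v1 v2 v3 : Int) (h21 : (k2 == k1) = false)
    (h31 : (k3 == k1) = false) (h32 : (k3 == k2) = false) :
    (((((PySem.Dict.empty : PySem.Dict Int Int).insert k1 v1).insert k2 v2).insert k3 v3)).items
      = [(k1, v1), (k2, v2), (k3, v3)] := by
  have c3 : ((((PySem.Dict.empty : PySem.Dict Int Int).insert k1 v1).insert k2 v2)).contains k3 = false := by
    rw [PySem.Dict.contains_insert, PySem.Dict.contains_insert]; simp [h31, h32]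
  rw [PySem.Dict.items_insert_of_not_contains _ _ c3, pvIns2 _ _ _ _ h21]; rfl

lemma pvIns4 (k1 k2 k3 k4 v1 v2 v3 v4 : Int) (h21 : (k2 == k1) = false)
    (h31 : (k3 == k1) = false) (h32 : (k3 == k2) = false)
    (h41 : (k4 == k1) = false) (h42 : (k4 == k2) = false) (h43 : (k4 == k3) = false) :
    ((((((PySem.Dict.empty : PySem.Dict Int Int).insert k1 v1).insert k2 v2).insert k3 v3).insert k4 v4)).items
      = [(k1, v1), (k2, v2), (k3, v3), (k4, v4)] := by
  have c4 : (((((PySem.Dict.empty : PySem.Dict Int Int).insert k1 v1).insert k2 v2).insert k3 v3)).contains k4 = false := by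
    rw [PySem.Dict.contains_insert, PySem.Dict.contains_insert, PySem.Dict.contains_insert]
    simp [h41, h42, h43]
  rw [PySem.Dict.items_insert_of_not_contains _ _ c4, pvIns3 _ _ _ _ _ _ h21 h31 h32]; rfl

lemma pvA_items : ∀ (s : List (Int × Int)), (s.map (·.1)).Nodup →
    (((PySem.List.enumerate s).foldl (pvAstep [100, 75, 50, 25])
        (((((PySem.Dict.empty : PySem.Dict Int (List Int)).insert 100 []).insert 75 []).insert 50 []).insert 25 [])).items.foldl pvAres
        (PySem.Dict.empty : PySem.Dict Int Int)).items
      = (s.zip ([100, 75, 50, 25] : List Int)).map (fun p => (p.1.1, p.2)) := by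
  intro s hnd
  obtain _ | ⟨a, _ | ⟨b, _ | ⟨c, _ | ⟨d, rest⟩⟩⟩⟩ := s
  · rfl
  · show ((PySem.Dict.empty : PySem.Dict Int Int).insert a.1 100).items = [(a.1, (100 : Int))]
    exact pvIns1 a.1 100
  · simp at hnd
    have h21 : (b.1 == a.1) = false := by simp [Ne.symm hnd]
    show ((((PySem.Dict.empty : PySem.Dict Int Int)).insert a.1 100).insert b.1 75).items
        = [(a.1, (100 : Int)), (b.1, 75)]
    exact pvIns2 _ _ _ _ h21
  · simp at hnd
    obtain ⟨⟨hab, hac⟩, hbc⟩ := hnd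
    have h21 : (b.1 == a.1) = false := by simp [Ne.symm hab]
    have h31 : (c.1 == a.1) = false := by simp [Ne.symm hac]
    have h32 : (c.1 == b.1) = false := by simp [Ne.symm hbc]
    show (((((PySem.Dict.empty : PySem.Dict Int Int)).insert a.1 100).insert b.1 75).insert c.1 50).items
        = [(a.1, (100 : Int)), (b.1, 75), (c.1, 50)]
    exact pvIns3 _ _ _ _ _ _ h21 h31 h32
  · simp at hnd
    obtain ⟨⟨hab, hac, had, -⟩, ⟨hbc, hbd, -⟩, ⟨hcd, -⟩, -⟩ := hnd
    have h21 : (b.1 == a.1) = false := by simp [Ne.symm hab]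
    have h31 : (c.1 == a.1) = false := by simp [Ne.symm hac]
    have h32 : (c.1 == b.1) = false := by simp [Ne.symm hbc]
    have h41 : (d.1 == a.1) = false := by simp [Ne.symm had]
    have h42 : (d.1 == b.1) = false := by simp [Ne.symm hbd]
    have h43 : (d.1 == c.1) = false := by simp [Ne.symm hcd]
    rw [show PySem.List.enumerate (a :: b :: c :: d :: rest)
        = PySem.List.enumerate ([a, b, c, d] ++ rest) from rfl,
      PySem.List.enumerate_append, List.foldl_append,
      pvAfold_high rest _ _ (by simp)]
    show ((((((PySem.Dict.empty : PySem.Dict Int Int)).insert a.1 100).insert b.1 75).insert c.1 50).insert d.1 25).items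
        = ((a :: b :: c :: d :: rest).zip ([100, 75, 50, 25] : List Int)).map (fun p => (p.1.1, p.2))
    rw [pvIns4 _ _ _ _ _ _ _ _ h21 h31 h32 h41 h42 h43]
    simp

lemma pvA_eq (times : List Int) :
    calculate_place_points times =
      ((PySem.List.sorted (PySem.List.enumerate times) (fun x => x.2) false).zip
        ([100, 75, 50, 25] : List Int)).map (fun p => (p.1.1, p.2)) := by
  have hnd : ((PySem.List.sorted (PySem.List.enumerate times) (fun x => x.2) false).map (·.1)).Nodup := by
    have hp := (PySem.List.sorted_perm (PySem.List.enumerate times) (fun x => x.2) false).map (·.1)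
    exact hp.nodup_iff.mpr
      ((List.pairwise_map.mpr (PySem.List.pairwise_lt_enumerate times 0)).imp ne_of_lt)
  exact pvA_items _ hnd

-- ===== VERDICT (by name: the statement is the Claim_ definition above) =====
theorem calculate_place_points_spec : Claim_equal_calculate_place_points := by
  intro times _
  show _ = _
  rw [pvA_eq, calculate_place_points_alt,
    pvLoopB_eq [100, 75, 50, 25] _ _ (PySem.List.pairwise_lt_enumerate times 0)
      (fun y _ => PySem.Dict.contains_empty y.1)]
  rfl
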